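-- pv_equiv track=rewrite | github.com/RONErony2/OJT-tasks | python/wrapstring.py | wrap_string
-- ===== SOURCE A (Python) =====
-- def wrap_string(string, width):
--     string = string.strip()
--     if len(string) == 0 or width == 0 or width > len(string):
--         return []
--     res = ""
--     paragraph = []
--     for char in string:
--         if char != " ":
--             res += char
--             if len(res) == width:
--                 paragraph.append(res[::-1])
--                 res = ""
--     return paragraph
-- ===== SOURCE B (Python) =====
-- def wrap_string(string, width):
--     stripped = string.strip()
--     if len(stripped) == 0 or width <= 0 or width > len(stripped):
--         return []
--     filtered = ''.join(c for c in stripped if c != ' ')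
--     chunks = []
--     while len(filtered) >= width:
--         chunks.append(filtered[:width][::-1])
--         filtered = filtered[width:]
--     return chunks
-- ===== Notes on version B (the rewrite author's own statement) =====
-- stated objective: alternative
-- what changed: A grows a character accumulator inside a per-char loop and flushes it each time it reaches width; B filters out the spaces once and then slices width-sized blocks off the front in a while loop, reversing each slice.
import Mathlib
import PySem

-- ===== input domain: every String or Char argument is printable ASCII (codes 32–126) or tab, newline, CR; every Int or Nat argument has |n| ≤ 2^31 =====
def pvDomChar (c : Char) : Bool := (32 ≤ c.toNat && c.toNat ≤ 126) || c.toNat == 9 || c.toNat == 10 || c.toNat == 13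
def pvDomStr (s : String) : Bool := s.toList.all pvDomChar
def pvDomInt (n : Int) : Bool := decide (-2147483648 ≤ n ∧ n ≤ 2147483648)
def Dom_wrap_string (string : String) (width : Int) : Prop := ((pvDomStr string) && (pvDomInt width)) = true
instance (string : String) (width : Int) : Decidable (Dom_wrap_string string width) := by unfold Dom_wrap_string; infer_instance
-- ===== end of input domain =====

-- B replaces A's char-by-char accumulator with filter-then-slice chunking (same values, different decomposition).

-- ===== PORT A =====
-- A's loop state: (res, paragraph); res[::-1] is List.reverse (PySem slice?_none_none_neg_one).
def wrapAStep (width : Int) (st : List Char × List String) (c : Char) : List Char × List String :=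
  if c ≠ ' ' then
    let res := st.1 ++ [c]
    if (res.length : Int) = width then ([], st.2 ++ [String.ofList res.reverse])
    else (res, st.2)
  else st

def wrap_string (string : String) (width : Int) : List String :=
  let s := PySem.Chars.strip string.toList
  if (s.length : Int) = 0 ∨ width = 0 ∨ width > (s.length : Int) then []
  else (s.foldl (wrapAStep width) ([], [])).2

-- ===== PORT B =====
-- B's while loop: slice off the first `width` chars (filtered[:width] / filtered[width:] are
-- take/drop for the guarded 0 < width), reverse, repeat; the 0 < width conjunct in the guard is
-- the totality condition (Source B's loop runs only when width ≥ 1).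
def wrapBLoop (width : Int) (filtered : List Char) (chunks : List String) : List String :=
  if _h : width ≤ (filtered.length : Int) ∧ 0 < width then
    wrapBLoop width (filtered.drop width.toNat)
      (chunks ++ [String.ofList ((filtered.take width.toNat).reverse)])
  else chunks
termination_by filtered.length
decreasing_by
  have h1 : 1 ≤ width.toNat := by omega
  have h2 : width.toNat ≤ filtered.length := by omega
  simp [List.length_drop]; omega

def wrap_string_alt (string : String) (width : Int) : List String :=
  let stripped := PySem.Chars.strip string.toList
  if (stripped.length : Int) = 0 ∨ width ≤ 0 ∨ width > (stripped.length : Int) then []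
  else
    let filtered := stripped.filter (fun c => c ≠ ' ')
    wrapBLoop width filtered []

-- ===== PRECONDITION & SPEC =====
def Spec_wrap_string (string : String) (width : Int) (out : List String) : Prop := out = wrap_string_alt string width
instance (string : String) (width : Int) (out : List String) : Decidable (Spec_wrap_string string width out) := by unfold Spec_wrap_string; infer_instance

-- ===== CLAIM (what is proved, stated in full; the proofs are below) =====
def Claim_equal_wrap_string : Prop := ∀ (string : String) (width : Int), Dom_wrap_string string width → Spec_wrap_string string width (wrap_string string width)

-- ===== LEMMAS AND PROOFS =====

-- With a negative width A's inner `len(res) == width` test never fires: paragraph is unchanged.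
theorem foldA_neg (width : Int) (hw : width < 0) :
    ∀ (cs : List Char) (st : List Char × List String),
      (cs.foldl (wrapAStep width) st).2 = st.2 := by
  intro cs
  induction cs with
  | nil => intro st; rfl
  | cons c cs ih =>
    intro st
    simp only [List.foldl_cons]
    rw [ih]
    unfold wrapAStep
    by_cases hc : c = ' '
    · simp [hc]
    · rw [if_pos (by simp [hc])]
      rw [if_neg (by have := Int.natCast_nonneg (st.1 ++ [c]).length; omega)]

-- Main invariant: for 0 < width, A's accumulator loop from state (res, par) with res shorter
-- than width produces exactly B's slice-off loop on res ++ (the non-space chars still to come).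
theorem foldA_eq_wrapBLoop (width : Int) (hw : 0 < width) :
    ∀ (cs res : List Char) (par : List String), (res.length : Int) < width →
      (cs.foldl (wrapAStep width) (res, par)).2
        = wrapBLoop width (res ++ cs.filter (fun c => c ≠ ' ')) par := by
  intro cs
  induction cs with
  | nil =>
    intro res par hres
    simp only [List.foldl_nil, List.filter_nil, List.append_nil]
    rw [wrapBLoop, dif_neg (by omega)]
  | cons c cs ih =>
    intro res par hres
    by_cases hc : c = ' '
    · subst hc
      simp only [List.foldl_cons]
      rw [show wrapAStep width (res, par) ' ' = (res, par) from by unfold wrapAStep; simp]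
      rw [show List.filter (fun c => (decide (c ≠ ' '))) (' ' :: cs)
            = List.filter (fun c => (decide (c ≠ ' '))) cs from by simp]
      exact ih res par hres
    · simp only [List.foldl_cons, List.filter_cons]
      rw [if_pos (by simp [hc])]
      have hstep : wrapAStep width (res, par) c =
          (if ((res ++ [c]).length : Int) = width then ([], par ++ [String.ofList (res ++ [c]).reverse])
           else (res ++ [c], par)) := by
        unfold wrapAStep
        rw [if_pos (by simp [hc])]
      by_cases hfull : ((res ++ [c]).length : Int) = width
      · rw [hstep, if_pos hfull]
        rw [ih [] (par ++ [String.ofList (res ++ [c]).reverse]) (by simpa using hw)]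
        have hlen : (res ++ [c]).length = width.toNat := by
          simp at hfull ⊢; omega
        have hassoc : res ++ c :: cs.filter (fun c => decide (c ≠ ' '))
            = (res ++ [c]) ++ cs.filter (fun c => decide (c ≠ ' ')) := by simp
        have htake : (res ++ c :: cs.filter (fun c => decide (c ≠ ' '))).take width.toNat
            = res ++ [c] := by rw [hassoc, ← hlen, List.take_left]
        have hdrop : (res ++ c :: cs.filter (fun c => decide (c ≠ ' '))).drop width.toNat
            = cs.filter (fun c => decide (c ≠ ' ')) := by rw [hassoc, ← hlen, List.drop_left]
        conv_rhs => rw [wrapBLoop]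
        have hfull' : ((res ++ [c]).length : Int) = width := hfull
        simp only [List.length_append, List.length_cons, List.length_nil] at hfull'
        push_cast at hfull'
        rw [dif_pos ⟨by rw [hassoc]; simp only [List.length_append, List.length_cons, List.length_nil]; push_cast; omega, hw⟩]
        rw [htake, hdrop]
        simp
      · rw [hstep, if_neg hfull]
        rw [ih (res ++ [c]) par (by simp at hfull ⊢; omega)]
        simp

-- ===== VERDICT (by name: the statement is the Claim_ definition above) =====
theorem wrap_string_spec : Claim_equal_wrap_string := by
  intro string width _
  unfold Spec_wrap_string wrap_string wrap_string_alt
  set s := PySem.Chars.strip string.toList with hs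
  by_cases hA : (s.length : Int) = 0 ∨ width = 0 ∨ width > (s.length : Int)
  · rw [if_pos hA, if_pos (by rcases hA with h | h | h <;> omega)]
  · rw [if_neg hA]
    by_cases hneg : width < 0
    · rw [if_pos (by omega)]
      exact foldA_neg width hneg s ([], [])
    · have hw : 0 < width := by omega
      rw [if_neg (by omega)]
      simpa using foldA_eq_wrapBLoop width hw s [] [] (by simpa using hw)
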